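-- pv_equiv track=rewrite | github.com/Argifari/Kerja | DASPRO KULIAH/DuelSihir.py | Skor
-- ===== SOURCE A (Python) =====
-- def FirstElmt(L):
--     return L[0]
--
-- def Tail(L):
--     return L[1:]
--
-- def isEmpty(L):
--     return L == []
--
-- def Skor(S,M,pointS,pointM):
--     if isEmpty(S):
--         if pointM < pointS :
--             return 'Snape Menang'
--         elif pointM > pointS :
--             return 'McGonagall Menang'
--         elif pointS == pointM :
--             return 'Keduanya Seri'
--     elif FirstElmt(S) > FirstElmt(M):
--         return Skor(Tail(S),Tail(M),pointS + 1, pointM)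
--     elif FirstElmt(S) < FirstElmt(M):
--         return Skor(Tail(S),Tail(M),pointS, pointM + 1)
--     elif FirstElmt(S) == FirstElmt(M):
--         return Skor(Tail(S),Tail(M),pointS,pointM)
-- ===== SOURCE B (Python) =====
-- def Skor(S, M, pointS, pointM):
--     for i in range(len(S)):
--         if S[i] > M[i]:
--             pointS += 1
--         elif S[i] < M[i]:
--             pointM += 1
--     if pointM < pointS:
--         return 'Snape Menang'
--     if pointM > pointS:
--         return 'McGonagall Menang'
--     return 'Keduanya Seri'
-- ===== Notes on version B (the rewrite author's own statement) =====
-- stated objective: faster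
-- what changed: Replaces the four-way tail recursion that rebuilds both lists by slicing at every step with a single non-recursive index loop over range(len(S)) accumulating the two counters, followed by the verdict comparison.
import Mathlib
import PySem

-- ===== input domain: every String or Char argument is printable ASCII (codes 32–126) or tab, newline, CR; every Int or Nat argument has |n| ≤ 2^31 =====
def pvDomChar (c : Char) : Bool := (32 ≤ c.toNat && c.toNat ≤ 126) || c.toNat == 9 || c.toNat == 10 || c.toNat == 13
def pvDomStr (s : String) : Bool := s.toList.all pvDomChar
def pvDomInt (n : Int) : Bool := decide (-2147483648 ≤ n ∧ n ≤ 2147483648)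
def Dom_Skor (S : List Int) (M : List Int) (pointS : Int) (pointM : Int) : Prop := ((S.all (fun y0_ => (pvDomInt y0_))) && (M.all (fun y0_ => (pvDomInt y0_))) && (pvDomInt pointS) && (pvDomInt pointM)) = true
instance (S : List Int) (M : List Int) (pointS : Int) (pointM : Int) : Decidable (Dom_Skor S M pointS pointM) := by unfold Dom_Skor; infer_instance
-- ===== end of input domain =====

-- B replaces A's four-way tail recursion (which rebuilds both lists by slicing) with a
-- single non-recursive index loop over range(len(S)) accumulating the two counters (faster: no tail copies).

-- ===== PORT A =====
-- literal port of A's tail recursion; FirstElmt(M) = M[0] raises IndexError when M is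
-- exhausted before S, so the 'none' arm (value irrelevant) is excluded by Pre_Skor.
def Skor (S : List Int) (M : List Int) (pointS : Int) (pointM : Int) : String :=
  match S with
  | [] =>
    if pointM < pointS then "Snape Menang"
    else if pointM > pointS then "McGonagall Menang"
    else "Keduanya Seri"
  | s :: S' =>
    match PySem.List.pyGet? M 0 with
    | none => ""  -- IndexError in Python; outside Pre_Skor
    | some m =>
      if s > m then Skor S' (PySem.List.slice M (some 1) none) (pointS + 1) pointM
      else if s < m then Skor S' (PySem.List.slice M (some 1) none) pointS (pointM + 1)
      else Skor S' (PySem.List.slice M (some 1) none) pointS pointM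

-- ===== PORT B =====
-- literal port of Source B: for i in range(len(S)) indexing both lists; inside Pre_Skor every
-- index is in range, so the defaulted lookup pyGetD _ _ 0 is exact there.
def Skor_alt (S : List Int) (M : List Int) (pointS : Int) (pointM : Int) : String :=
  let p := (PySem.List.pyRange 0 (S.length : Int) 1).foldl
    (fun (p : Int × Int) i =>
      if PySem.List.pyGetD S i 0 > PySem.List.pyGetD M i 0 then (p.1 + 1, p.2)
      else if PySem.List.pyGetD S i 0 < PySem.List.pyGetD M i 0 then (p.1, p.2 + 1)
      else p)
    (pointS, pointM)
  if p.2 < p.1 then "Snape Menang"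
  else if p.2 > p.1 then "McGonagall Menang"
  else "Keduanya Seri"

-- ===== PRECONDITION & SPEC =====
-- Pre_ excludes exactly the inputs where M is shorter than S: both A and B raise
-- IndexError there (A via M[0] on the exhausted tail, B via M[i]).
def Pre_Skor (S : List Int) (M : List Int) (pointS : Int) (pointM : Int) : Prop :=
  S.length ≤ M.length
instance (S : List Int) (M : List Int) (pointS : Int) (pointM : Int) : Decidable (Pre_Skor S M pointS pointM) := by unfold Pre_Skor; infer_instance

def pvWitness_Skor : List Int × List Int × Int × Int := ([3, 1, 2], [2, 5, 2], 0, 0)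

def Spec_Skor (S : List Int) (M : List Int) (pointS : Int) (pointM : Int) (out : String) : Prop := out = Skor_alt S M pointS pointM
instance (S : List Int) (M : List Int) (pointS : Int) (pointM : Int) (out : String) : Decidable (Spec_Skor S M pointS pointM out) := by unfold Spec_Skor; infer_instance

-- ===== CLAIM (what is proved, stated in full; the proofs are below) =====
def Claim_equal_Skor : Prop := ∀ (S : List Int) (M : List Int) (pointS : Int) (pointM : Int), Dom_Skor S M pointS pointM → Pre_Skor S M pointS pointM → Spec_Skor S M pointS pointM (Skor S M pointS pointM)

-- ===== LEMMAS AND PROOFS =====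

-- B's loop, read as a function of the lists: shifting the index range by one is the same
-- as dropping the heads of both lists.
theorem skor_loop_shift (s : Int) (S' : List Int) (m : Int) (M' : List Int)
    (init : Int × Int) :
    (PySem.List.pyRange 1 ((S'.length : Int) + 1) 1).foldl
      (fun (p : Int × Int) i =>
        if PySem.List.pyGetD (s :: S') i 0 > PySem.List.pyGetD (m :: M') i 0 then (p.1 + 1, p.2)
        else if PySem.List.pyGetD (s :: S') i 0 < PySem.List.pyGetD (m :: M') i 0 then (p.1, p.2 + 1)
        else p) init
    = (PySem.List.pyRange 0 (S'.length : Int) 1).foldl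
      (fun (p : Int × Int) i =>
        if PySem.List.pyGetD S' i 0 > PySem.List.pyGetD M' i 0 then (p.1 + 1, p.2)
        else if PySem.List.pyGetD S' i 0 < PySem.List.pyGetD M' i 0 then (p.1, p.2 + 1)
        else p) init := by
  rw [PySem.List.pyRange_one 1 ((S'.length : Int) + 1),
      PySem.List.pyRange_one 0 (S'.length : Int)]
  simp only [add_sub_cancel_right, sub_zero, Int.toNat_natCast, List.foldl_map]
  apply PySem.List.foldl_congr_mem
  intro acc k _
  have e1 : PySem.List.pyGetD (s :: S') (1 + (k : Int)) 0 = PySem.List.pyGetD S' (k : Int) 0 := by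
    rw [show (1 + (k : Int)) = ((k + 1 : Nat) : Int) by push_cast; ring]
    simp only [PySem.List.pyGetD_natCast, List.getD_cons_succ]
  have e2 : PySem.List.pyGetD (m :: M') (1 + (k : Int)) 0 = PySem.List.pyGetD M' (k : Int) 0 := by
    rw [show (1 + (k : Int)) = ((k + 1 : Nat) : Int) by push_cast; ring]
    simp only [PySem.List.pyGetD_natCast, List.getD_cons_succ]
  rw [show ((0 : Int) + (k : Int)) = (k : Int) from zero_add _, e1, e2]

-- A's recursion equals B's loop-then-compare, for M at least as long as S.
theorem skor_eq (S : List Int) : ∀ (M : List Int) (pointS pointM : Int),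
    S.length ≤ M.length → Skor S M pointS pointM = Skor_alt S M pointS pointM := by
  induction S with
  | nil =>
    intro M pS pM _
    simp [Skor, Skor_alt]
  | cons s S' ih =>
    intro M pS pM hlen
    match M with
    | [] => simp at hlen
    | m :: M' =>
      have hlen' : S'.length ≤ M'.length := by simpa using hlen
      have h0 : (0 : Int) < ((s :: S').length : Int) := by exact_mod_cast Nat.succ_pos _
      have hcast : (((s :: S').length : Nat) : Int) = (S'.length : Int) + 1 := by
        push_cast [List.length_cons]; ring
      have hfold : ∀ init : Int × Int,
          (PySem.List.pyRange 0 (((s :: S').length : Nat) : Int) 1).foldl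
            (fun (p : Int × Int) i =>
              if PySem.List.pyGetD (s :: S') i 0 > PySem.List.pyGetD (m :: M') i 0 then (p.1 + 1, p.2)
              else if PySem.List.pyGetD (s :: S') i 0 < PySem.List.pyGetD (m :: M') i 0 then (p.1, p.2 + 1)
              else p) init
          = (PySem.List.pyRange 0 ((S'.length : Nat) : Int) 1).foldl
            (fun (p : Int × Int) i =>
              if PySem.List.pyGetD S' i 0 > PySem.List.pyGetD M' i 0 then (p.1 + 1, p.2)
              else if PySem.List.pyGetD S' i 0 < PySem.List.pyGetD M' i 0 then (p.1, p.2 + 1)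
              else p)
            (if s > m then (init.1 + 1, init.2)
             else if s < m then (init.1, init.2 + 1) else init) := by
        intro init
        rw [PySem.List.pyRange_one_cons h0, List.foldl_cons]
        simp only [PySem.List.pyGetD_zero_cons]
        rw [hcast, zero_add, skor_loop_shift]
      simp only [Skor, PySem.List.pyGet?_zero_cons, PySem.List.slice_from_one, List.tail_cons]
      by_cases h1 : s > m
      · rw [if_pos h1, ih M' (pS + 1) pM hlen']
        simp only [Skor_alt, hfold, if_pos h1]
      · by_cases h2 : s < m
        · rw [if_neg h1, if_pos h2, ih M' pS (pM + 1) hlen']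
          simp only [Skor_alt, hfold, if_neg h1, if_pos h2]
        · rw [if_neg h1, if_neg h2, ih M' pS pM hlen']
          simp only [Skor_alt, hfold, if_neg h1, if_neg h2]

-- ===== VERDICT (by name: the statement is the Claim_ definition above) =====
theorem Skor_spec : Claim_equal_Skor := by
  intro S M pointS pointM _ hpre
  exact skor_eq S M pointS pointM hpre
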